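-- pv_equiv track=rewrite | github.com/AI-confused/CCL2022_CGED-8_Top1_project | Grammar_Error_Detect/Bert+CRF/src/bert_crf_result.py | get_entity_span
-- ===== SOURCE A (Python) =====
-- def get_entity_span(label: int, start: int, logit: int, entity_type: str, text: str):
--     """Get entity span end index.
--     17分类解码
--     @label:
--     @start:
--     @logit:
--     @entity_type: S or BIE
--     return
--     @has entity: bool
--     @entity_end: 实体的右边界
--     @search_end: 解码范围的右边界
--     """
--     index = start+1
--     if entity_type == 'BIE':
--         span = []
--         while index<len(logit):
--             if logit[index] == label+4 or logit[index] == label+8: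
--                 # 把同一个标签的I和E先添加进去
--                 span.append(logit[index])
--                 index += 1
--             else:
--                 # 当遇到其他类型的标签时，开始分析已有的解码序列
--                 if label+8 not in span: # 不存在E, 则返回-1
--                     return False, -1, index
--                 first_E_index = span.index(label+8)
--                 return True, start+1+first_E_index+1, index
--     elif entity_type == 'S':
--         if start == len(logit)-1 or logit[start] != logit[index]:
--             return True, index, index
--         else:
--             return False, -1, index
--         # return True, index, index
--     else:
--         raise Exception('wrong entity_type')
--     # 持续解码到了末尾
--     if label+8 not in span: # 不存在E, 则返回-1
--         return False, -1, index
--     first_E_index = span.index(label+8)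
--     return True, start+1+first_E_index+1, index
-- ===== SOURCE B (Python) =====
-- def get_entity_span(label: int, start: int, logit: int, entity_type: str, text: str):
--     """Classify-then-search: map the tail to a tag sequence ('E'/'I'/'X'), then the run
--     boundary is the first 'X' and the entity end is the first 'E' if it falls inside the run."""
--     index = start + 1
--     if entity_type == 'BIE':
--         tags = ['E' if logit[i] == label + 8 else 'I' if logit[i] == label + 4 else 'X'
--                 for i in range(index, len(logit))]
--         run = tags.index('X') if 'X' in tags else len(tags)
--         e = tags.index('E') if 'E' in tags else -1
--         if 0 <= e < run:
--             return True, index + e + 1, index + run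
--         return False, -1, index + run
--     elif entity_type == 'S':
--         if start == len(logit) - 1 or logit[start] != logit[index]:
--             return True, index, index
--         else:
--             return False, -1, index
--     else:
--         raise Exception('wrong entity_type')
-- ===== Notes on version B (the rewrite author's own statement) =====
-- stated objective: alternative
-- what changed: A's stateful while-loop with an accumulated span list and in/.index post-analysis is replaced by a classify-then-search scheme: the whole tail is mapped once to a tag sequence ('E'/'I'/'X'), the run boundary is the first 'X' (or the end) and the entity end is the first 'E' when it falls inside the run.
import Mathlib
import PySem

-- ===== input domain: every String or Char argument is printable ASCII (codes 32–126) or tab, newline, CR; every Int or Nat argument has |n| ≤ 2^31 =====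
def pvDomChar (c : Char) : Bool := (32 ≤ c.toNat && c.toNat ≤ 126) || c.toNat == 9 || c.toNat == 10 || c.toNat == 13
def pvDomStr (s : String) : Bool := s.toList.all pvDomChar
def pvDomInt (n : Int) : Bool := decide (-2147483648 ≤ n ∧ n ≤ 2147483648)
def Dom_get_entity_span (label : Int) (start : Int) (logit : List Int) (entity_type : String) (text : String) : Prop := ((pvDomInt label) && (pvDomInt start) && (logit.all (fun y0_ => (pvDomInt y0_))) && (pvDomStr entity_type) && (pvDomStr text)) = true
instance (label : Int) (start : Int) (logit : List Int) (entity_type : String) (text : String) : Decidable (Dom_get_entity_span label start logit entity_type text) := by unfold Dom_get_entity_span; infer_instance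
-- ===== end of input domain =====

-- B replaces A's stateful while-loop (span accumulator + in/.index post-analysis) by a
-- classify-then-search scheme over a derived tag sequence; objective: alternative (same cost).

-- ===== PORT A =====
-- A's post-loop analysis: `if label+8 not in span: return False,-1,index; first_E_index = span.index(label+8); return True, start+1+first_E_index+1, index`
def pvAAnalyze (label : Int) (start : Int) (span : List Int) (index : Int) : Bool × Int × Int :=
  match PySem.List.index? span (label + 8) with
  | none => (false, -1, index)
  | some k => (true, start + 1 + (k : Int) + 1, index)

-- A's while-loop, carrying the `span` accumulator (pyGet? none = IndexError, excluded by Pre_; treated as loop exit)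
def pvALoop (label : Int) (start : Int) (logit : List Int) (span : List Int) (index : Int) : Bool × Int × Int :=
  if _h : index < (logit.length : Int) then
    match PySem.List.pyGet? logit index with
    | some v =>
      if v = label + 4 ∨ v = label + 8 then
        pvALoop label start logit (span ++ [v]) (index + 1)
      else
        pvAAnalyze label start span index
    | none => pvAAnalyze label start span index
  else
    pvAAnalyze label start span index
termination_by ((logit.length : Int) - index).toNat
decreasing_by omega

def get_entity_span (label : Int) (start : Int) (logit : List Int) (entity_type : String) (text : String) : Bool × Int × Int :=
  let index := start + 1
  if entity_type = "BIE" then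
    pvALoop label start logit [] index
  else if entity_type = "S" then
    if start = (logit.length : Int) - 1 ∨ PySem.List.pyGet? logit start ≠ PySem.List.pyGet? logit index then
      (true, index, index)
    else
      (false, -1, index)
  else
    (false, -1, 0)  -- Python raises Exception('wrong entity_type'); excluded by Pre_

-- ===== PORT B =====
-- tag of position i: 'E' if logit[i]==label+8 else 'I' if logit[i]==label+4 else 'X'
-- (pyGet? none = IndexError in the Python comprehension; excluded by Pre_, tagged 'X' here)
def pvTag (label : Int) (logit : List Int) (i : Int) : Char :=
  match PySem.List.pyGet? logit i with
  | some v => if v = label + 8 then 'E' else if v = label + 4 then 'I' else 'X'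
  | none => 'X'

-- the comprehension: [tag(i) for i in range(index, len(logit))]
def pvTags (label : Int) (logit : List Int) (index : Int) : List Char :=
  (PySem.List.pyRange index (logit.length : Int) 1).map (pvTag label logit)

-- `tags.index('X') if 'X' in tags else len(tags)`
def pvRunOf (tags : List Char) : Int :=
  match PySem.List.index? tags 'X' with
  | some k => (k : Int)
  | none => (tags.length : Int)

-- `tags.index('E') if 'E' in tags else -1`
def pvEOf (tags : List Char) : Int :=
  match PySem.List.index? tags 'E' with
  | some k => (k : Int)
  | none => -1

def get_entity_span_alt (label : Int) (start : Int) (logit : List Int) (entity_type : String) (text : String) : Bool × Int × Int :=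
  let index := start + 1
  if entity_type = "BIE" then
    let tags := pvTags label logit index
    let run := pvRunOf tags
    let e := pvEOf tags
    if 0 ≤ e ∧ e < run then (true, index + e + 1, index + run)
    else (false, -1, index + run)
  else if entity_type = "S" then
    if start = (logit.length : Int) - 1 ∨ PySem.List.pyGet? logit start ≠ PySem.List.pyGet? logit index then
      (true, index, index)
    else
      (false, -1, index)
  else
    (false, -1, 0)

-- ===== PRECONDITION & SPEC =====
-- Pre_ excludes exactly the inputs where Python A raises: entity_type other than 'BIE'/'S'
-- (explicit Exception), a 'BIE' start so negative that logit[start+1] is an IndexError, and an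
-- 'S' start whose logit[start]/logit[start+1] access is an IndexError.
def Pre_get_entity_span (label : Int) (start : Int) (logit : List Int) (entity_type : String) (text : String) : Prop :=
  (entity_type = "BIE" ∧ ((logit.length : Int) ≤ start + 1 ∨ -(logit.length : Int) ≤ start + 1)) ∨
  (entity_type = "S" ∧ (start = (logit.length : Int) - 1 ∨ (-(logit.length : Int) ≤ start ∧ start < (logit.length : Int) - 1)))
instance (label : Int) (start : Int) (logit : List Int) (entity_type : String) (text : String) : Decidable (Pre_get_entity_span label start logit entity_type text) := by unfold Pre_get_entity_span; infer_instance

def pvWitness_get_entity_span : Int × Int × List Int × String × String := (0, 0, [1, 4, 8, 2], "BIE", "")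

def Spec_get_entity_span (label : Int) (start : Int) (logit : List Int) (entity_type : String) (text : String) (out : Bool × Int × Int) : Prop := out = get_entity_span_alt label start logit entity_type text
instance (label : Int) (start : Int) (logit : List Int) (entity_type : String) (text : String) (out : Bool × Int × Int) : Decidable (Spec_get_entity_span label start logit entity_type text out) := by unfold Spec_get_entity_span; infer_instance

-- ===== CLAIM (what is proved, stated in full; the proofs are below) =====
def Claim_equal_get_entity_span : Prop := ∀ (label : Int) (start : Int) (logit : List Int) (entity_type : String) (text : String), Dom_get_entity_span label start logit entity_type text → Pre_get_entity_span label start logit entity_type text → Spec_get_entity_span label start logit entity_type text (get_entity_span label start logit entity_type text)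

-- ===== LEMMAS AND PROOFS =====

-- proof-side model of A's scan boundary (where A's while-loop stops)
def pvBScan (label : Int) (logit : List Int) (index : Int) : Int :=
  if _h : index < (logit.length : Int) then
    match PySem.List.pyGet? logit index with
    | some v => if v = label + 4 ∨ v = label + 8 then pvBScan label logit (index + 1) else index
    | none => index
  else index
termination_by ((logit.length : Int) - index).toNat
decreasing_by omega

-- the elements A's loop appends to `span` from position i onward
def pvCollect (label : Int) (logit : List Int) (i : Int) : List Int :=
  if _h : i < (logit.length : Int) then
    match PySem.List.pyGet? logit i with
    | some v => if v = label + 4 ∨ v = label + 8 then v :: pvCollect label logit (i + 1) else []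
    | none => []
  else []
termination_by ((logit.length : Int) - i).toNat
decreasing_by omega

-- A's analysis with the run's base offset made explicit
def pvFin (label : Int) (i : Int) (s : List Int) (j : Int) : Bool × Int × Int :=
  match PySem.List.index? s (label + 8) with
  | none => (false, -1, j)
  | some k => (true, i + (k : Int) + 1, j)

-- B's BIE result as a function of the tag list and the base offset
def pvComb (tags : List Char) (i : Int) : Bool × Int × Int :=
  if 0 ≤ pvEOf tags ∧ pvEOf tags < pvRunOf tags then (true, i + pvEOf tags + 1, i + pvRunOf tags)
  else (false, -1, i + pvRunOf tags)

lemma pvAAnalyze_eq_fin (label start : Int) (s : List Int) (j : Int) :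
    pvAAnalyze label start s j = pvFin label (start + 1) s j := by
  unfold pvAAnalyze pvFin
  cases PySem.List.index? s (label + 8) <;> rfl

lemma pvALoop_eq (label start : Int) (logit : List Int) :
    ∀ i span, pvALoop label start logit span i =
      pvFin label (start + 1) (span ++ pvCollect label logit i) (pvBScan label logit i) := by
  intro i span
  induction i using pvBScan.induct label logit generalizing span with
  | case1 i h v hv hrun ih =>
    rw [pvALoop, pvCollect, pvBScan]
    simp only [h, hv, hrun, if_true, dif_pos]
    rw [ih (span ++ [v]), List.append_cons]
    simp
  | case2 i h v hv hrun =>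
    rw [pvALoop, pvCollect, pvBScan]
    simp only [h, hv, hrun, if_false, dif_pos]
    simp [pvAAnalyze_eq_fin]
  | case3 i h hv =>
    rw [pvALoop, pvCollect, pvBScan]
    simp only [h, hv, dif_pos]
    simp [pvAAnalyze_eq_fin]
  | case4 i h =>
    rw [pvALoop, pvCollect, pvBScan]
    simp only [h]
    simp [pvAAnalyze_eq_fin]

-- unfolding of the tag list at the head of the range
lemma pvTags_cons (label : Int) (logit : List Int) (i : Int) (h : i < (logit.length : Int)) :
    pvTags label logit i = pvTag label logit i :: pvTags label logit (i + 1) := by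
  unfold pvTags
  rw [PySem.List.pyRange_one_cons h]
  simp

lemma pvTags_nil (label : Int) (logit : List Int) (i : Int) (h : ¬ i < (logit.length : Int)) :
    pvTags label logit i = [] := by
  unfold pvTags
  rw [PySem.List.pyRange_one_eq_nil (by omega)]
  rfl

lemma pvRunOf_cons_X (t : List Char) : pvRunOf ('X' :: t) = 0 := by
  unfold pvRunOf
  rw [PySem.List.index?_cons_self]
  simp

lemma pvRunOf_cons_ne (c : Char) (t : List Char) (h : c ≠ 'X') :
    pvRunOf (c :: t) = pvRunOf t + 1 := by
  unfold pvRunOf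
  rw [PySem.List.index?_cons_of_ne _ h]
  cases PySem.List.index? t 'X' <;> simp

lemma pvRunOf_nonneg (t : List Char) : 0 ≤ pvRunOf t := by
  unfold pvRunOf
  cases PySem.List.index? t 'X' <;> simp

lemma pvEOf_cons_E (t : List Char) : pvEOf ('E' :: t) = 0 := by
  unfold pvEOf
  rw [PySem.List.index?_cons_self]
  simp

lemma pvEOf_cons_ne (c : Char) (t : List Char) (h : c ≠ 'E') :
    pvEOf (c :: t) = if pvEOf t = -1 then -1 else pvEOf t + 1 := by
  unfold pvEOf
  rw [PySem.List.index?_cons_of_ne _ h]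
  cases PySem.List.index? t 'E' <;> simp

lemma pvEOf_cases (t : List Char) : pvEOf t = -1 ∨ 0 ≤ pvEOf t := by
  unfold pvEOf
  cases PySem.List.index? t 'E' <;> simp

lemma pvScan_run (label : Int) (logit : List Int) :
    ∀ i, pvBScan label logit i = i + pvRunOf (pvTags label logit i) := by
  intro i
  induction i using pvBScan.induct label logit with
  | case1 i h v hv hrun ih =>
    have hc : pvTag label logit i ≠ 'X' := by
      unfold pvTag; rw [hv]
      rcases hrun with h4 | h8
      · by_cases h8 : v = label + 8 <;> simp [h4]
      · simp [h8]
    rw [pvBScan]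
    simp only [h, hv, hrun, dif_pos, if_true]
    rw [ih, pvTags_cons label logit i h, pvRunOf_cons_ne _ _ hc]
    ring
  | case2 i h v hv hrun =>
    have hc : pvTag label logit i = 'X' := by
      unfold pvTag; rw [hv]
      simp only [not_or] at hrun
      simp [hrun.1, hrun.2]
    rw [pvBScan]
    simp only [h, hv, hrun, dif_pos, if_false]
    rw [pvTags_cons label logit i h, hc, pvRunOf_cons_X]
    ring
  | case3 i h hv =>
    have hc : pvTag label logit i = 'X' := by unfold pvTag; rw [hv]
    rw [pvBScan]
    simp only [h, hv, dif_pos]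
    rw [pvTags_cons label logit i h, hc, pvRunOf_cons_X]
    ring
  | case4 i h =>
    rw [pvBScan]
    simp only [h, dif_neg, not_false_iff]
    rw [pvTags_nil label logit i h]
    simp [pvRunOf]

lemma pvComb_eq_fin (label : Int) (logit : List Int) :
    ∀ i, pvComb (pvTags label logit i) i =
      pvFin label i (pvCollect label logit i) (pvBScan label logit i) := by
  intro i
  induction i using pvBScan.induct label logit with
  | case1 i h v hv hrun ih =>
    have hscan : pvBScan label logit i = pvBScan label logit (i + 1) := by
      rw [pvBScan]; simp [h, hv, hrun]
    have hcol : pvCollect label logit i = v :: pvCollect label logit (i + 1) := by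
      rw [pvCollect]; simp [h, hv, hrun]
    rw [pvTags_cons label logit i h, hcol, hscan]
    by_cases h8 : v = label + 8
    · -- head is an E: both sides resolve immediately
      have hc : pvTag label logit i = 'E' := by unfold pvTag; rw [hv]; simp [h8]
      rw [hc]
      have hsc : pvBScan label logit (i + 1) =
          i + (pvRunOf (pvTags label logit (i + 1)) + 1) := by
        rw [← hscan, pvScan_run label logit i, pvTags_cons label logit i h, hc,
            pvRunOf_cons_ne _ _ (by decide)]
      unfold pvComb pvFin
      rw [pvEOf_cons_E, pvRunOf_cons_ne _ _ (by decide),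
          if_pos (show (0:Int) ≤ 0 ∧ (0:Int) < pvRunOf (pvTags label logit (i + 1)) + 1 from
            ⟨le_refl 0, by have := pvRunOf_nonneg (pvTags label logit (i + 1)); omega⟩)]
      rw [h8, PySem.List.index?_cons_self, hsc]
      simp
    · -- head is an I: both sides shift the tail result by one
      have h4 : v = label + 4 := by tauto
      have hc : pvTag label logit i = 'I' := by unfold pvTag; rw [hv]; simp [h4]
      rw [hc]
      have hfin : pvFin label i (v :: pvCollect label logit (i + 1)) (pvBScan label logit (i + 1)) =
          pvFin label (i + 1) (pvCollect label logit (i + 1)) (pvBScan label logit (i + 1)) := by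
        unfold pvFin
        rw [PySem.List.index?_cons_of_ne _ (fun hx => h8 hx)]
        cases PySem.List.index? (pvCollect label logit (i + 1)) (label + 8) with
        | none => simp
        | some k =>
          simp only [Option.map_some]
          simp [Prod.ext_iff]
          ring
      rw [hfin, ← ih]
      unfold pvComb
      rw [pvEOf_cons_ne _ _ (by decide), pvRunOf_cons_ne _ _ (by decide)]
      rcases pvEOf_cases (pvTags label logit (i + 1)) with hE | hE
      · rw [hE]
        rw [if_pos (rfl : (-1:Int) = -1)]
        rw [if_neg (show ¬((0:Int) ≤ -1 ∧ (-1:Int) < pvRunOf (pvTags label logit (i + 1)) + 1) from by omega)]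
        rw [if_neg (show ¬((0:Int) ≤ -1 ∧ (-1:Int) < pvRunOf (pvTags label logit (i + 1))) from by omega)]
        simp only [Prod.mk.injEq, true_and]
        omega
      · have hne : ¬ (pvEOf (pvTags label logit (i + 1)) = -1) := by omega
        simp only [if_neg hne]
        by_cases hlt : pvEOf (pvTags label logit (i + 1)) < pvRunOf (pvTags label logit (i + 1))
        · rw [if_pos (show (0:Int) ≤ pvEOf (pvTags label logit (i + 1)) + 1 ∧
                pvEOf (pvTags label logit (i + 1)) + 1 < pvRunOf (pvTags label logit (i + 1)) + 1 from
                ⟨by omega, by omega⟩),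
              if_pos (show (0:Int) ≤ pvEOf (pvTags label logit (i + 1)) ∧
                pvEOf (pvTags label logit (i + 1)) < pvRunOf (pvTags label logit (i + 1)) from
                ⟨hE, hlt⟩)]
          simp only [Prod.mk.injEq, true_and]
          omega
        · rw [if_neg (by omega), if_neg (by omega)]
          simp only [Prod.mk.injEq, true_and]
          omega
  | case2 i h v hv hrun =>
    have hc : pvTag label logit i = 'X' := by
      unfold pvTag; rw [hv]
      simp only [not_or] at hrun
      simp [hrun.1, hrun.2]
    have hscan : pvBScan label logit i = i := by rw [pvBScan]; simp [h, hv, hrun]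
    have hcol : pvCollect label logit i = [] := by rw [pvCollect]; simp [h, hv, hrun]
    rw [pvTags_cons label logit i h, hc, hcol, hscan]
    unfold pvComb pvFin
    rw [pvRunOf_cons_X]
    have := pvEOf_cases ('X' :: pvTags label logit (i + 1))
    rw [if_neg (by omega)]
    simp [PySem.List.index?]
  | case3 i h hv =>
    have hc : pvTag label logit i = 'X' := by unfold pvTag; rw [hv]
    have hscan : pvBScan label logit i = i := by rw [pvBScan]; simp [h, hv]
    have hcol : pvCollect label logit i = [] := by rw [pvCollect]; simp [h, hv]
    rw [pvTags_cons label logit i h, hc, hcol, hscan]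
    unfold pvComb pvFin
    rw [pvRunOf_cons_X]
    have := pvEOf_cases ('X' :: pvTags label logit (i + 1))
    rw [if_neg (by omega)]
    simp [PySem.List.index?]
  | case4 i h =>
    have hscan : pvBScan label logit i = i := by rw [pvBScan]; simp [h]
    have hcol : pvCollect label logit i = [] := by rw [pvCollect]; simp [h]
    rw [pvTags_nil label logit i h, hcol, hscan]
    unfold pvComb pvFin pvEOf pvRunOf
    simp [PySem.List.index?]

-- ===== VERDICT (by name: the statement is the Claim_ definition above) =====
theorem get_entity_span_spec : Claim_equal_get_entity_span := by
  intro label start logit entity_type text _hdom _hpre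
  unfold Spec_get_entity_span get_entity_span get_entity_span_alt
  by_cases hB : entity_type = "BIE"
  · simp only [hB, if_true]
    rw [pvALoop_eq]
    simp only [List.nil_append]
    exact (pvComb_eq_fin label logit (start + 1)).symm
  · simp [hB]
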